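-- pv_equiv track=rewrite | github.com/afkarxyz/Twitter-X-Media-Batch-Downloader | ui/mainWindow.py | normalize_url_to_username
-- ===== SOURCE A (Python) =====
-- def normalize_url_to_username(url_or_username):
--     url_or_username = url_or_username.strip()
--     username = url_or_username
--
--     if "x.com/" in url_or_username or "twitter.com/" in url_or_username:
--         parts = url_or_username.split('/')
--         for i, part in enumerate(parts):
--             if part in ['x.com', 'twitter.com'] and i + 1 < len(parts):
--                 username = parts[i + 1]
--                 username = username.split('/')[0]
--                 break
--
--     username = username.strip()
--     return username if username else None
-- ===== SOURCE B (Python) =====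
-- def _next_segment(s, k):
--     j = s.find('/', k)
--     return s[k:] if j == -1 else s[k:j]
--
-- def normalize_url_to_username(url_or_username):
--     s = url_or_username.strip()
--     username = s
--     boundary = True
--     i = 0
--     n = len(s)
--     while i < n:
--         if boundary:
--             if s.startswith("x.com/", i):
--                 username = _next_segment(s, i + 6)
--                 break
--             if s.startswith("twitter.com/", i):
--                 username = _next_segment(s, i + 12)
--                 break
--         boundary = s[i] == '/'
--         i += 1
--     username = username.strip()
--     return username or None
-- ===== Notes on version B (the rewrite author's own statement) =====
-- stated objective: alternative
-- what changed: B never splits the string: instead of building the '/'-segment list and scanning it with an index loop, it does one character-level scan with a segment-boundary flag, firing startswith('x.com/'/'twitter.com/') at boundaries and taking the following run up to the next '/'.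
import Mathlib
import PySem

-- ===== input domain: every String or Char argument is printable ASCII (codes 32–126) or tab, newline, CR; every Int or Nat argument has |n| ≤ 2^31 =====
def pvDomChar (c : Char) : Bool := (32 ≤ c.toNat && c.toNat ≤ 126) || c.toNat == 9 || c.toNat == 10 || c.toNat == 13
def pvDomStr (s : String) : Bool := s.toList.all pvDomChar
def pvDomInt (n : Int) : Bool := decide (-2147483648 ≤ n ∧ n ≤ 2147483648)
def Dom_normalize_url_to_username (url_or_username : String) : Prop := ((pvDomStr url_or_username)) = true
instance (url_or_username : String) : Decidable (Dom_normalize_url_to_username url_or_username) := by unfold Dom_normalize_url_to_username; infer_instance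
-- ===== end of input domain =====

-- B replaces A's split-on-'/' plus segment loop by a single character scan with a
-- boundary flag (startswith at segment boundaries, then next segment up to '/'): no split
-- list is built; objective 'alternative'.

-- ===== PORT A =====
-- the 'for i, part in enumerate(parts): … break' loop of A
def pvLoopA (parts : List (List Char)) : List (Int × List Char) → List Char → List Char
  | [], username => username
  | (i, part) :: rest, username =>
      if (part = "x.com".toList ∨ part = "twitter.com".toList) ∧ i + 1 < (parts.length : Int) then
        -- username = parts[i + 1]; username = username.split('/')[0]
        PySem.List.pyGetD (PySem.Chars.splitOn (PySem.List.pyGetD parts (i + 1) []) ['/']) 0 []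
      else pvLoopA parts rest username

def normalize_url_to_username (url_or_username : String) : Option String :=
  let s := PySem.Chars.strip url_or_username.toList
  let username := s
  let username :=
    if PySem.Chars.isIn "x.com/".toList s || PySem.Chars.isIn "twitter.com/".toList s then
      let parts := PySem.Chars.splitOn s ['/']
      pvLoopA parts (PySem.List.enumerate parts 0) username
    else username
  let username := PySem.Chars.strip username
  if username ≠ [] then some (String.ofList username) else none

-- ===== PORT B =====
-- s.find('/', k) relative to the suffix t = s[k:]: index of the first '/' in t
def pvFindSlash : List Char → Option Nat
  | [] => none
  | c :: rest => if c = '/' then some 0 else (pvFindSlash rest).map (· + 1)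

-- _next_segment(s, k): j = s.find('/', k); s[k:] if j == -1 else s[k:j]   (on the suffix t = s[k:])
def pvNextSegment (t : List Char) : List Char :=
  match pvFindSlash t with
  | none => t
  | some j => t.take j

-- the 'while i < n: …' scan of B, as structural recursion on the suffix s[i:]
-- (s.startswith(m, i) reads only s[i:], s[i] is its head — exact)
def pvScanPos : List Char → Bool → List Char → List Char
  | [], _, username => username
  | c :: rest, boundary, username =>
      if boundary && List.isPrefixOf "x.com/".toList (c :: rest) then
        pvNextSegment (List.drop 6 (c :: rest))
      else if boundary && List.isPrefixOf "twitter.com/".toList (c :: rest) then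
        pvNextSegment (List.drop 12 (c :: rest))
      else pvScanPos rest (c == '/') username

def normalize_url_to_username_alt (url_or_username : String) : Option String :=
  let s := PySem.Chars.strip url_or_username.toList
  let username := pvScanPos s true s
  let username := PySem.Chars.strip username
  if username ≠ [] then some (String.ofList username) else none

-- ===== PRECONDITION & SPEC =====
def Spec_normalize_url_to_username (url_or_username : String) (out : Option String) : Prop := out = normalize_url_to_username_alt url_or_username
instance (url_or_username : String) (out : Option String) : Decidable (Spec_normalize_url_to_username url_or_username out) := by unfold Spec_normalize_url_to_username; infer_instance

-- ===== CLAIM (what is proved, stated in full; the proofs are below) =====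
def Claim_equal_normalize_url_to_username : Prop := ∀ (url_or_username : String), Dom_normalize_url_to_username url_or_username → Spec_normalize_url_to_username url_or_username (normalize_url_to_username url_or_username)

-- ===== LEMMAS AND PROOFS =====

-- proof-side bridge: A's indexed loop, reformulated as a scan over adjacent pairs of the split
def pvScanB : List (List Char × List Char) → List Char → List Char
  | [], username => username
  | (prev, nxt) :: rest, username =>
      if prev = "x.com".toList ∨ prev = "twitter.com".toList then nxt
      else pvScanB rest username

-- equation lemmas for the fueled splitter PySem.Chars.splitOn.go
theorem pvGo_zero (sep l cur : List Char) (acc : List (List Char)) :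
    PySem.Chars.splitOn.go sep 0 l cur acc = ((cur.reverse ++ l) :: acc).reverse := by
  simp [PySem.Chars.splitOn.go]

theorem pvGo_nil (sep cur : List Char) (fuel : Nat) (acc : List (List Char)) :
    PySem.Chars.splitOn.go sep (fuel+1) [] cur acc = (cur.reverse :: acc).reverse := by
  simp [PySem.Chars.splitOn.go]

theorem pvGo_cons (sep : List Char) (fuel : Nat) (c : Char) (rest cur : List Char) (acc : List (List Char)) :
    PySem.Chars.splitOn.go sep (fuel+1) (c :: rest) cur acc =
      if sep.isPrefixOf (c :: rest) then
        PySem.Chars.splitOn.go sep fuel (List.drop sep.length (c :: rest)) [] (cur.reverse :: acc)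
      else PySem.Chars.splitOn.go sep fuel rest (c :: cur) acc := by
  rw [PySem.Chars.splitOn.go]

theorem pvGo_ne_nil (sep : List Char) (fuel : Nat) : ∀ (l cur : List Char) (acc : List (List Char)),
    PySem.Chars.splitOn.go sep fuel l cur acc ≠ [] := by
  induction fuel with
  | zero => intro l cur acc; simp [pvGo_zero]
  | succ f ih =>
    intro l cur acc
    cases l with
    | nil => simp [pvGo_nil]
    | cons c rest => rw [pvGo_cons]; split_ifs <;> apply ih

theorem pvGo_acc (sep : List Char) (fuel : Nat) : ∀ (l cur : List Char) (acc : List (List Char)),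
    PySem.Chars.splitOn.go sep fuel l cur acc = acc.reverse ++ PySem.Chars.splitOn.go sep fuel l cur [] := by
  induction fuel with
  | zero => intro l cur acc; simp [pvGo_zero]
  | succ f ih =>
    intro l cur acc
    cases l with
    | nil => simp [pvGo_nil]
    | cons c rest =>
      rw [pvGo_cons, pvGo_cons]
      split_ifs with h
      · rw [ih _ [] (cur.reverse :: acc), ih _ [] [cur.reverse]]; simp
      · exact ih rest (c :: cur) acc

theorem pvGo_cur (sep : List Char) (fuel : Nat) : ∀ (l cur : List Char),
    PySem.Chars.splitOn.go sep fuel l cur [] =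
      (PySem.Chars.splitOn.go sep fuel l [] []).modifyHead (cur.reverse ++ ·) := by
  induction fuel with
  | zero => intro l cur; simp [pvGo_zero]
  | succ f ih =>
    intro l cur
    cases l with
    | nil => simp [pvGo_nil]
    | cons c rest =>
      rw [pvGo_cons, pvGo_cons]
      split_ifs with h
      · rw [pvGo_acc sep f _ [] [cur.reverse], pvGo_acc sep f _ [] [List.reverse []]]
        simp
      · rw [ih rest (c :: cur), ih rest [c]]
        cases hX : PySem.Chars.splitOn.go sep f rest [] [] with
        | nil => exact absurd hX (pvGo_ne_nil sep f rest [] [])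
        | cons p ps => simp

theorem pvInter_cons (sep x : List Char) (xs : List (List Char)) (h : xs ≠ []) :
    List.intercalate sep (x :: xs) = x ++ sep ++ List.intercalate sep xs := by
  cases xs with
  | nil => exact absurd rfl h
  | cons y t => simp [List.intercalate, List.intersperse]

theorem pvInter_modifyHead (sep pre : List Char) (X : List (List Char)) (h : X ≠ []) :
    List.intercalate sep (X.modifyHead (pre ++ ·)) = pre ++ List.intercalate sep X := by
  cases X with
  | nil => exact absurd rfl h
  | cons p ps =>
    cases ps with
    | nil => simp [List.intercalate]
    | cons q t =>
      rw [List.modifyHead_cons, pvInter_cons sep (pre ++ p) (q :: t) (by simp),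
        pvInter_cons sep p (q :: t) (by simp)]
      simp

theorem pvGo_join (fuel : Nat) : ∀ (l : List Char), l.length < fuel →
    List.intercalate ['/'] (PySem.Chars.splitOn.go ['/'] fuel l [] []) = l := by
  induction fuel with
  | zero => intro l h; omega
  | succ f ih =>
    intro l h
    cases l with
    | nil => simp [pvGo_nil, List.intercalate]
    | cons c rest =>
      rw [pvGo_cons]
      by_cases hc : c = '/'
      · rw [if_pos (by simp [List.isPrefixOf, hc])]
        simp only [List.length_cons, List.length_nil, List.drop_succ_cons, List.drop_zero,
          List.reverse_nil, Nat.zero_add]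
        rw [pvGo_acc ['/'] f rest [] [[]],
          show ([[]] : List (List Char)).reverse ++ PySem.Chars.splitOn.go ['/'] f rest [] []
            = [] :: PySem.Chars.splitOn.go ['/'] f rest [] [] by simp]
        rw [pvInter_cons _ _ _ (pvGo_ne_nil ['/'] f rest [] []), ih rest (by simpa using h)]
        simp [hc]
      · rw [if_neg (by simp [List.isPrefixOf]; intro h'; exact absurd h'.symm hc)]
        rw [pvGo_cur ['/'] f rest [c]]
        rw [pvInter_modifyHead _ _ _ (pvGo_ne_nil ['/'] f rest [] []), ih rest (by simpa using h)]
        simp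

theorem pvGo_nosep (fuel : Nat) : ∀ (l : List Char), l.length < fuel →
    ∀ p ∈ PySem.Chars.splitOn.go ['/'] fuel l [] [], '/' ∉ p := by
  induction fuel with
  | zero => intro l h; omega
  | succ f ih =>
    intro l h
    cases l with
    | nil => intro p hp; simp [pvGo_nil] at hp; simp [hp]
    | cons c rest =>
      rw [pvGo_cons]
      by_cases hc : c = '/'
      · rw [if_pos (by simp [List.isPrefixOf, hc])]
        simp only [List.length_cons, List.length_nil, List.drop_succ_cons, List.drop_zero,
          List.reverse_nil, Nat.zero_add]
        rw [pvGo_acc ['/'] f rest [] [[]]]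
        intro p hp
        rcases List.mem_append.mp hp with h1 | h2
        · simp at h1; simp [h1]
        · exact ih rest (by simpa using h) p h2
      · rw [if_neg (by simp [List.isPrefixOf]; intro h'; exact absurd h'.symm hc)]
        rw [pvGo_cur ['/'] f rest [c]]
        cases hX : PySem.Chars.splitOn.go ['/'] f rest [] [] with
        | nil => exact absurd hX (pvGo_ne_nil ['/'] f rest [] [])
        | cons p ps =>
          intro q hq
          simp only [List.modifyHead_cons] at hq
          rcases List.mem_cons.mp hq with h1 | h2
          · subst h1; intro hmem
            rcases List.mem_append.mp hmem with h1 | h2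
            · simp at h1; exact hc h1.symm
            · exact ih rest (by simpa using h) p (hX ▸ List.mem_cons_self ..) h2
          · exact ih rest (by simpa using h) q (hX ▸ List.mem_cons_of_mem _ h2)

theorem pvGo_no_sep_in (fuel : Nat) : ∀ (l cur : List Char) (acc : List (List Char)), '/' ∉ l →
    PySem.Chars.splitOn.go ['/'] fuel l cur acc = ((cur.reverse ++ l) :: acc).reverse := by
  induction fuel with
  | zero => intro l cur acc _; exact pvGo_zero ..
  | succ f ih =>
    intro l cur acc h
    cases l with
    | nil => simp [pvGo_nil]
    | cons c rest =>
      rw [pvGo_cons]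
      have hc : c ≠ '/' := fun hc => h (hc ▸ List.mem_cons_self ..)
      rw [if_neg (by simp [List.isPrefixOf]; intro h'; exact absurd h'.symm hc)]
      rw [ih rest (c :: cur) acc (fun hm => h (List.mem_cons_of_mem _ hm))]
      simp

theorem pvSplitOn_single (u : List Char) (h : '/' ∉ u) : PySem.Chars.splitOn u ['/'] = [u] := by
  unfold PySem.Chars.splitOn
  rw [pvGo_no_sep_in _ _ _ _ h]; simp

theorem pvSplitOn_join (s : List Char) :
    List.intercalate ['/'] (PySem.Chars.splitOn s ['/']) = s := by
  unfold PySem.Chars.splitOn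
  exact pvGo_join _ _ (Nat.lt_succ_self _)

theorem pvSplitOn_nosep (s : List Char) : ∀ p ∈ PySem.Chars.splitOn s ['/'], '/' ∉ p := by
  unfold PySem.Chars.splitOn
  exact pvGo_nosep _ _ (Nat.lt_succ_self _)

-- a host segment with a successor segment shows up as 'host/' in the joined string
theorem pvHost_infix (host : List Char) (parts : List (List Char)) : ∀ (i : Nat),
    i + 1 < parts.length → parts[i]? = some host →
    (host ++ ['/']) <:+: List.intercalate ['/'] parts := by
  induction parts with
  | nil => intro i h _; simp at h
  | cons a t ih =>
    intro i h1 h2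
    cases i with
    | zero =>
      simp at h2
      subst h2
      have ht : t ≠ [] := by simp at h1; exact List.ne_nil_of_length_pos (by omega)
      rw [pvInter_cons _ _ _ ht]
      exact ⟨[], List.intercalate ['/'] t, by simp⟩
    | succ j =>
      simp at h2
      have hlt : j + 1 < t.length := by simp at h1; omega
      have ht : t ≠ [] := List.ne_nil_of_length_pos (by omega)
      rw [pvInter_cons _ _ _ ht]
      obtain ⟨u, v, huv⟩ := ih j hlt h2
      exact ⟨a ++ ['/'] ++ u, v, by rw [← huv]; simp⟩

-- A's indexed loop over the full parts list equals the adjacent-pair scan of the split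
theorem pvLoop_eq (parts : List (List Char)) (hns : ∀ p ∈ parts, '/' ∉ p) (u : List Char) :
    ∀ (n k : Nat), parts.length - k = n →
      pvLoopA parts (PySem.List.enumerate (parts.drop k) (k : Int)) u
        = pvScanB ((parts.drop k).zip (parts.drop (k+1))) u := by
  intro n
  induction n with
  | zero =>
    intro k hk
    have h1 : parts.drop k = [] := List.drop_eq_nil_of_le (by omega)
    have h2 : parts.drop (k+1) = [] := List.drop_eq_nil_of_le (by omega)
    simp [h1, h2, pvLoopA, pvScanB]
  | succ n ih =>
    intro k hk
    have hklt : k < parts.length := by omega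
    rw [List.drop_eq_getElem_cons hklt, PySem.List.enumerate_cons]
    by_cases hlen : k + 1 < parts.length
    · have hd : parts.drop (k+1) = parts[k+1] :: parts.drop (k+2) := by
        rw [List.drop_eq_getElem_cons hlen]
      rw [hd, List.zip_cons_cons]
      rw [pvLoopA, pvScanB]
      by_cases hm : parts[k]'hklt = "x.com".toList ∨ parts[k]'hklt = "twitter.com".toList
      · rw [if_pos ⟨hm, by exact_mod_cast hlen⟩, if_pos hm]
        have hcast : (k : Int) + 1 = ((k + 1 : Nat) : Int) := by push_cast; ring
        rw [hcast, PySem.List.pyGetD_eq_getElem parts [] (by positivity) (by exact_mod_cast hlen)]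
        simp only [Int.toNat_natCast]
        rw [pvSplitOn_single _ (hns _ (List.getElem_mem hlen))]
        rw [PySem.List.pyGetD_eq_getElem [parts[k+1]] [] (by norm_num) (by norm_num)]
        simp
      · rw [if_neg (by tauto), if_neg hm]
        have := ih (k+1) (by omega)
        rw [← hd]
        have hcast : ((k + 1 : Nat) : Int) = (k : Int) + 1 := by push_cast; ring
        rw [hcast] at this
        exact this
    · have hd : parts.drop (k+1) = [] := List.drop_eq_nil_of_le (by omega)
      rw [hd]
      simp only [List.zip_nil_right]
      rw [pvLoopA, pvScanB]
      rw [if_neg (by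
        rintro ⟨-, hlt⟩
        have : (k : Int) + 1 < (parts.length : Int) := hlt
        exact hlen (by exact_mod_cast this))]
      simp [pvLoopA]

-- if no host segment has a successor, the pair scan returns its default
theorem pvScan_nomatch (u0 : List Char) : ∀ (z : List (List Char × List Char)),
    (∀ pr ∈ z, ¬(pr.1 = "x.com".toList ∨ pr.1 = "twitter.com".toList)) → pvScanB z u0 = u0 := by
  intro z
  induction z with
  | nil => intro _; rfl
  | cons pr rest ih =>
    intro h
    obtain ⟨p, q⟩ := pr
    rw [pvScanB, if_neg (h (p, q) (List.mem_cons_self ..))]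
    exact ih fun x hx => h x (List.mem_cons_of_mem _ hx)

theorem pvGateFalse (s : List Char)
    (hx : ¬ ("x.com/".toList <:+: s)) (ht : ¬ ("twitter.com/".toList <:+: s)) :
    pvScanB ((PySem.Chars.splitOn s ['/']).zip (PySem.Chars.splitOn s ['/']).tail) s = s := by
  apply pvScan_nomatch
  intro pr hpr hmatch
  set parts := PySem.Chars.splitOn s ['/'] with hparts
  obtain ⟨j, hj, hjeq⟩ := List.getElem_of_mem hpr
  rw [List.getElem_zip] at hjeq
  have hjlen : j + 1 < parts.length := by
    simp [List.length_zip, List.length_tail] at hj; omega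
  have h1 : parts[j]? = some pr.1 := by
    rw [List.getElem?_eq_getElem (by omega)]
    rw [← hjeq]
  have hinf := pvHost_infix pr.1 parts j hjlen h1
  rw [pvSplitOn_join] at hinf
  rcases hmatch with hh | hh
  · exact hx (by rw [hh] at hinf; simpa using hinf)
  · exact ht (by rw [hh] at hinf; simpa using hinf)

-- ===== B-side lemmas =====

theorem pvInter_single (sep x : List Char) : List.intercalate sep [x] = x := by
  simp [List.intercalate, List.intersperse]

-- a marker m1 ++ ['/'] is never a prefix of a '/'-free list
theorem pvNoSlash_noPrefix (m1 : List Char) : ∀ (t : List Char), '/' ∉ t →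
    List.isPrefixOf (m1 ++ ['/']) t = false := by
  induction m1 with
  | nil =>
    intro t ht
    cases t with
    | nil => rfl
    | cons c r =>
      have hc : c ≠ '/' := fun h => ht (h ▸ List.mem_cons_self ..)
      simp [List.isPrefixOf, Ne.symm hc]
  | cons x m1' ih =>
    intro t ht
    cases t with
    | nil => rfl
    | cons c r =>
      simp only [List.cons_append, List.isPrefixOf_cons₂]
      cases hxc : x == c with
      | false => simp
      | true =>
        simp only [Bool.true_and]
        exact ih r (fun hm => ht (List.mem_cons_of_mem _ hm))

-- boundary characterisation: m1 ++ ['/'] prefixes a ++ '/' :: r  iff  a = m1  ('/'-free sides)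
theorem pvPrefix_iff (m1 : List Char) (hm : '/' ∉ m1) : ∀ (a : List Char), '/' ∉ a → ∀ (r : List Char),
    List.isPrefixOf (m1 ++ ['/']) (a ++ '/' :: r) = true ↔ a = m1 := by
  induction m1 with
  | nil =>
    intro a ha r
    cases a with
    | nil => simp [List.isPrefixOf]
    | cons c a' =>
      have hc : c ≠ '/' := fun h => ha (h ▸ List.mem_cons_self ..)
      simp [List.isPrefixOf, Ne.symm hc]
  | cons x m1' ih =>
    intro a ha r
    cases a with
    | nil =>
      have hx : x ≠ '/' := fun h => hm (h ▸ List.mem_cons_self ..)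
      simp [List.isPrefixOf, hx]
    | cons c a' =>
      simp only [List.cons_append, List.isPrefixOf_cons₂, Bool.and_eq_true, beq_iff_eq]
      rw [ih (fun h => hm (List.mem_cons_of_mem _ h)) a'
        (fun h => ha (List.mem_cons_of_mem _ h)) r]
      constructor
      · rintro ⟨h1, h2⟩; simp [h1, h2]
      · intro h; injection h with h1 h2; simp [h1, h2]

-- pvFindSlash on a '/'-free list
theorem pvFindSlash_none (t : List Char) (ht : '/' ∉ t) : pvFindSlash t = none := by
  induction t with
  | nil => rfl
  | cons c r ih =>
    have hc : c ≠ '/' := fun h => ht (h ▸ List.mem_cons_self ..)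
    rw [pvFindSlash, if_neg hc, ih (fun h => ht (List.mem_cons_of_mem _ h))]
    rfl

theorem pvFindSlash_split (b : List Char) (hb : '/' ∉ b) (r : List Char) :
    pvFindSlash (b ++ '/' :: r) = some b.length := by
  induction b with
  | nil => simp [pvFindSlash]
  | cons c b' ih =>
    have hc : c ≠ '/' := fun h => hb (h ▸ List.mem_cons_self ..)
    rw [List.cons_append, pvFindSlash, if_neg hc, ih (fun h => hb (List.mem_cons_of_mem _ h))]
    rfl

-- the next segment of a joined '/'-free list starting with b
theorem pvNextSegment_head (b : List Char) (hb : '/' ∉ b) (t : List (List Char)) :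
    pvNextSegment (List.intercalate ['/'] (b :: t)) = b := by
  cases t with
  | nil =>
    rw [pvInter_single, pvNextSegment, pvFindSlash_none b hb]
  | cons c t' =>
    rw [pvInter_cons _ _ _ (by simp)]
    rw [show b ++ ['/'] ++ List.intercalate ['/'] (c :: t')
          = b ++ '/' :: List.intercalate ['/'] (c :: t') by simp]
    rw [pvNextSegment, pvFindSlash_split b hb]
    simp

-- scanning a '/'-free list with the flag down never fires
theorem pvScanPos_free_false (u : List Char) : ∀ (cs : List Char), '/' ∉ cs →
    pvScanPos cs false u = u := by
  intro cs
  induction cs with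
  | nil => intro _; rfl
  | cons c r ih =>
    intro h
    have hc : c ≠ '/' := fun hh => h (hh ▸ List.mem_cons_self ..)
    rw [pvScanPos, if_neg (by simp), if_neg (by simp), beq_eq_false_iff_ne.mpr hc]
    exact ih (fun hm => h (List.mem_cons_of_mem _ hm))

-- scanning a '/'-free list never fires, whatever the flag
theorem pvScanPos_free (u : List Char) (cs : List Char) (h : '/' ∉ cs) (b : Bool) :
    pvScanPos cs b u = u := by
  cases cs with
  | nil => rfl
  | cons c r =>
    have hc : c ≠ '/' := fun hh => h (hh ▸ List.mem_cons_self ..)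
    have hx : List.isPrefixOf "x.com/".toList (c :: r) = false := by
      have := pvNoSlash_noPrefix "x.com".toList (c :: r) h
      simpa using this
    have ht : List.isPrefixOf "twitter.com/".toList (c :: r) = false := by
      have := pvNoSlash_noPrefix "twitter.com".toList (c :: r) h
      simpa using this
    rw [pvScanPos,
      if_neg (by simp only [Bool.and_eq_true]; rintro ⟨-, hp⟩; exact absurd (hp.symm.trans hx) (by simp)),
      if_neg (by simp only [Bool.and_eq_true]; rintro ⟨-, hp⟩; exact absurd (hp.symm.trans ht) (by simp)),
      beq_eq_false_iff_ne.mpr hc]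
    exact pvScanPos_free_false u r (fun hm => h (List.mem_cons_of_mem _ hm))

-- skipping a '/'-free run with the flag down, then its separator, re-raises the flag
theorem pvScanPos_skip (u r : List Char) : ∀ (cs : List Char), '/' ∉ cs →
    pvScanPos (cs ++ '/' :: r) false u = pvScanPos r true u := by
  intro cs
  induction cs with
  | nil =>
    intro _
    rw [List.nil_append, pvScanPos, if_neg (by simp), if_neg (by simp)]
    norm_num
  | cons c cs' ih =>
    intro h
    have hc : c ≠ '/' := fun hh => h (hh ▸ List.mem_cons_self ..)
    rw [List.cons_append, pvScanPos, if_neg (by simp), if_neg (by simp),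
      beq_eq_false_iff_ne.mpr hc]
    exact ih (fun hm => h (List.mem_cons_of_mem _ hm))

-- the scan fires on 'x.com/…' at a boundary and returns the next segment
theorem pvScanPos_fire_x (r u : List Char) :
    pvScanPos ("x.com".toList ++ '/' :: r) true u = pvNextSegment r := by
  rw [show "x.com".toList ++ '/' :: r = 'x' :: ('.' :: 'c' :: 'o' :: 'm' :: '/' :: r) from rfl,
    pvScanPos,
    if_pos (by simp)]
  rfl

theorem pvScanPos_fire_t (r u : List Char) :
    pvScanPos ("twitter.com".toList ++ '/' :: r) true u = pvNextSegment r := by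
  rw [show "twitter.com".toList ++ '/' :: r
        = 't' :: ('w' :: 'i' :: 't' :: 't' :: 'e' :: 'r' :: '.' :: 'c' :: 'o' :: 'm' :: '/' :: r) from rfl,
    pvScanPos,
    if_neg (by
      rw [show "x.com/".toList = 'x' :: '.' :: 'c' :: 'o' :: 'm' :: ['/'] from rfl]
      simp [List.isPrefixOf]),
    if_pos (by simp)]
  rfl

-- the pair scan over the split equals B's character scan over the joined string
theorem pvScanB_eq_scanPos : ∀ (parts : List (List Char)), (∀ p ∈ parts, '/' ∉ p) →
    ∀ (u : List Char),
      pvScanB (parts.zip parts.tail) u = pvScanPos (List.intercalate ['/'] parts) true u := by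
  intro parts
  induction parts with
  | nil => intro _ u; simp [pvScanB, List.intercalate, pvScanPos]
  | cons a t ih =>
    intro hns u
    have hafree : '/' ∉ a := hns a (List.mem_cons_self ..)
    cases t with
    | nil =>
      rw [pvInter_single]
      simp only [List.tail_cons, List.zip_nil_right]
      rw [show pvScanB [] u = u from rfl]
      exact (pvScanPos_free u a hafree true).symm
    | cons b t' =>
      have htfree : ∀ p ∈ b :: t', '/' ∉ p := fun p hp => hns p (List.mem_cons_of_mem _ hp)
      have hbfree : '/' ∉ b := htfree b (List.mem_cons_self ..)
      rw [List.tail_cons, List.zip_cons_cons, pvScanB]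
      rw [pvInter_cons _ _ _ (by simp)]
      rw [show a ++ ['/'] ++ List.intercalate ['/'] (b :: t')
          = a ++ '/' :: List.intercalate ['/'] (b :: t') by simp]
      set r := List.intercalate ['/'] (b :: t') with hr
      by_cases hm : a = "x.com".toList ∨ a = "twitter.com".toList
      · rw [if_pos hm]
        rcases hm with hm | hm
        · subst hm
          rw [pvScanPos_fire_x, hr, pvNextSegment_head b hbfree t']
        · subst hm
          rw [pvScanPos_fire_t, hr, pvNextSegment_head b hbfree t']
      · rw [if_neg hm]
        obtain ⟨hmx, hmt⟩ := not_or.mp hm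
        have hxne : List.isPrefixOf "x.com/".toList (a ++ '/' :: r) = false := by
          rw [show "x.com/".toList = "x.com".toList ++ ['/'] from rfl]
          cases hp : List.isPrefixOf ("x.com".toList ++ ['/']) (a ++ '/' :: r) with
          | false => rfl
          | true =>
            exact absurd ((pvPrefix_iff "x.com".toList (by decide) a hafree r).mp hp) hmx
        have htne : List.isPrefixOf "twitter.com/".toList (a ++ '/' :: r) = false := by
          rw [show "twitter.com/".toList = "twitter.com".toList ++ ['/'] from rfl]
          cases hp : List.isPrefixOf ("twitter.com".toList ++ ['/']) (a ++ '/' :: r) with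
          | false => rfl
          | true =>
            exact absurd ((pvPrefix_iff "twitter.com".toList (by decide) a hafree r).mp hp) hmt
        cases a with
        | nil =>
          have hxne' : List.isPrefixOf "x.com/".toList ('/' :: r) = false := by simpa using hxne
          have htne' : List.isPrefixOf "twitter.com/".toList ('/' :: r) = false := by simpa using htne
          rw [List.nil_append, pvScanPos,
            if_neg (by simp only [Bool.and_eq_true]; rintro ⟨-, hp⟩; exact absurd (hp.symm.trans hxne') (by simp)),
            if_neg (by simp only [Bool.and_eq_true]; rintro ⟨-, hp⟩; exact absurd (hp.symm.trans htne') (by simp))]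
          norm_num
          exact ih htfree u
        | cons c a' =>
          have hc : c ≠ '/' := fun hh => hafree (hh ▸ List.mem_cons_self ..)
          have hxne' : List.isPrefixOf "x.com/".toList (c :: (a' ++ '/' :: r)) = false := by
            simpa using hxne
          have htne' : List.isPrefixOf "twitter.com/".toList (c :: (a' ++ '/' :: r)) = false := by
            simpa using htne
          rw [List.cons_append, pvScanPos,
            if_neg (by simp only [Bool.and_eq_true]; rintro ⟨-, hp⟩; exact absurd (hp.symm.trans hxne') (by simp)),
            if_neg (by simp only [Bool.and_eq_true]; rintro ⟨-, hp⟩; exact absurd (hp.symm.trans htne') (by simp)),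
            beq_eq_false_iff_ne.mpr hc]
          rw [pvScanPos_skip u r a' (fun hm' => hafree (List.mem_cons_of_mem _ hm'))]
          exact ih htfree u

-- ===== VERDICT (by name: the statement is the Claim_ definition above) =====
theorem normalize_url_to_username_spec : Claim_equal_normalize_url_to_username := by
  intro x _
  simp only [Spec_normalize_url_to_username, normalize_url_to_username,
    normalize_url_to_username_alt]
  set s := PySem.Chars.strip x.toList with hs
  set parts := PySem.Chars.splitOn s ['/'] with hparts
  have hback : pvScanPos s true s = pvScanB (parts.zip parts.tail) s := by
    have := pvScanB_eq_scanPos parts (pvSplitOn_nosep s) s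
    rw [hparts, pvSplitOn_join] at this
    exact this.symm
  suffices husr :
      (if (PySem.Chars.isIn "x.com/".toList s || PySem.Chars.isIn "twitter.com/".toList s) = true
        then pvLoopA parts (PySem.List.enumerate parts 0) s else s)
        = pvScanPos s true s by
    rw [husr]
  rw [hback]
  by_cases hgate :
      (PySem.Chars.isIn "x.com/".toList s || PySem.Chars.isIn "twitter.com/".toList s) = true
  · rw [if_pos hgate]
    have := pvLoop_eq parts (pvSplitOn_nosep s) s parts.length 0 (by omega)
    simpa [List.drop_one] using this
  · rw [if_neg hgate]
    have hx : PySem.Chars.isIn "x.com/".toList s = false := by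
      revert hgate; cases PySem.Chars.isIn "x.com/".toList s <;> simp
    have ht : PySem.Chars.isIn "twitter.com/".toList s = false := by
      revert hgate; cases PySem.Chars.isIn "twitter.com/".toList s <;> simp
    exact (pvGateFalse s ((PySem.Chars.isIn_eq_false_iff _ _).mp hx)
      ((PySem.Chars.isIn_eq_false_iff _ _).mp ht)).symm
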